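-- pv_equiv track=rewrite | github.com/MykytaMaliarenko/ascii-bot | ascii.py | from_ascii_to_binary
-- ===== SOURCE A (Python) =====
-- def from_ascii_to_binary(txt: str) -> str:
--     txt = txt.replace(" ", "")
--     txt = txt.replace("\n", "")
--     txt = txt.replace("\t", "")
--
--     res = ""
--     while len(txt) > 0:
--         res += "0" + txt[1:8]
--         txt = txt[8:]
--     return res
-- ===== SOURCE B (Python) =====
-- def from_ascii_to_binary(txt: str) -> str:
--     txt = txt.replace(" ", "")
--     txt = txt.replace("\n", "")
--     txt = txt.replace("\t", "")
--
--     chars = list(txt)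
--     for i in range(0, len(chars), 8):
--         chars[i] = "0"
--     return "".join(chars)
-- ===== Notes on version B (the rewrite author's own statement) =====
-- stated objective: faster
-- what changed: Instead of repeatedly slicing the string and rebuilding every 8-char chunk by concatenation (quadratic string copying), B converts once to a mutable char list, overwrites only the stride-8 positions in place, and joins once.
import Mathlib
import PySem

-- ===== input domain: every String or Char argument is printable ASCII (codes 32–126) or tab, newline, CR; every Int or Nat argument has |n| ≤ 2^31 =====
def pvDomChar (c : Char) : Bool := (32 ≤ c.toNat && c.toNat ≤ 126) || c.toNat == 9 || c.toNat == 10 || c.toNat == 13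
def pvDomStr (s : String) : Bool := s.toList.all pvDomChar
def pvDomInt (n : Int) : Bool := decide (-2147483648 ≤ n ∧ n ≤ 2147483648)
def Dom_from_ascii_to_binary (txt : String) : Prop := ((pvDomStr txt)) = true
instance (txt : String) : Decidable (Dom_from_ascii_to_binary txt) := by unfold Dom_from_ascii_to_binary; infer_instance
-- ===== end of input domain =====

-- B replaces A's chunk-by-chunk string slicing/concatenation with a single mutable char
-- list whose stride-8 positions are overwritten in place (objective: faster, linear copying).

-- ===== PORT A =====
-- A's while loop: res += "0" + txt[1:8]; txt = txt[8:]   (on the char list of the stripped string)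
def pvALoop (cs : List Char) : List Char :=
  if _h : cs.length > 0 then
    ('0' :: PySem.List.slice cs (some 1) (some 8)) ++ pvALoop (PySem.List.slice cs (some 8) none)
  else []
termination_by cs.length
decreasing_by
  rw [PySem.List.slice_from _ (by norm_num : (0:Int) ≤ 8)]
  simp [List.length_drop]; omega

def from_ascii_to_binary (txt : String) : String :=
  let t1 := PySem.Str.replace txt " " ""
  let t2 := PySem.Str.replace t1 "\n" ""
  let t3 := PySem.Str.replace t2 "\t" ""
  String.ofList (pvALoop t3.toList)

-- ===== PORT B =====
-- B's loop: for i in range(0, len(chars), 8): chars[i] = "0"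
def from_ascii_to_binary_alt (txt : String) : String :=
  let t1 := PySem.Str.replace txt " " ""
  let t2 := PySem.Str.replace t1 "\n" ""
  let t3 := PySem.Str.replace t2 "\t" ""
  let chars := t3.toList
  String.ofList
    ((PySem.List.pyRange 0 (chars.length : Int) 8).foldl (fun cs i => cs.set i.toNat '0') chars)

-- ===== PRECONDITION & SPEC =====
def Spec_from_ascii_to_binary (txt : String) (out : String) : Prop := out = from_ascii_to_binary_alt txt
instance (txt : String) (out : String) : Decidable (Spec_from_ascii_to_binary txt out) := by unfold Spec_from_ascii_to_binary; infer_instance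

-- ===== CLAIM (what is proved, stated in full; the proofs are below) =====
def Claim_equal_from_ascii_to_binary : Prop := ∀ (txt : String), Dom_from_ascii_to_binary txt → Spec_from_ascii_to_binary txt (from_ascii_to_binary txt)

-- ===== LEMMAS AND PROOFS =====

-- B's loop body, abbreviated for the lemmas
def pvBRun (cs : List Char) : List Char :=
  (PySem.List.pyRange 0 (cs.length : Int) 8).foldl (fun cs i => cs.set i.toNat '0') cs

-- shifting the stride loop past a completed 8-char block
lemma pvFoldl_set_shift (ks : List Nat) (a r : List Char) (ha : a.length = 8) :
    (ks.map (fun k : Nat => (8 * (k : Int) + 8))).foldl (fun cs i => cs.set i.toNat '0') (a ++ r)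
      = a ++ (ks.map (fun k : Nat => (8 * (k : Int)))).foldl (fun cs i => cs.set i.toNat '0') r := by
  induction ks generalizing r with
  | nil => rfl
  | cons k ks ih =>
    simp only [List.map_cons, List.foldl_cons]
    have h1 : ((8 * (k : Int) + 8)).toNat = 8 * k + 8 := by omega
    have h2 : ((8 * (k : Int))).toNat = 8 * k := by omega
    rw [h1, h2, List.set_append, if_neg (by omega : ¬ (8 * k + 8 < a.length)), ha,
      (by omega : 8 * k + 8 - 8 = 8 * k)]
    exact ih _

lemma pvBRun_nil : pvBRun [] = [] := by simp [pvBRun, PySem.List.pyRange]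

-- the stride range as a mapped List.range
lemma pvRange_stride (n : Nat) : PySem.List.pyRange 0 (n : Int) 8
    = (List.range ((n + 7) / 8)).map (fun k : Nat => (8 * (k : Int))) := by
  by_cases hz : n = 0
  · simp [hz, PySem.List.pyRange]
  · have hpos : (0 : Int) < (n : Int) := by omega
    rw [PySem.List.pyRange_of_pos 0 (n : Int) (by norm_num), if_pos hpos]
    have hcnt : (((n : Int) - 0 + 8 - 1) / 8).toNat = ((n + 7) / 8 : Nat) := by omega
    rw [hcnt]
    exact List.map_congr_left (fun k _ => by ring)

-- B's stride loop, one 8-char chunk at a time (the shape of A's loop)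
lemma pvBRun_chunk (c : Char) (t : List Char) :
    pvBRun (c :: t) = ('0' :: (t.take 7)) ++ pvBRun ((c :: t).drop 8) := by
  set n : Nat := (c :: t).length with hn
  have hn1 : 1 ≤ n := by rw [hn]; simp
  have ht : n = t.length + 1 := by rw [hn]; simp
  obtain ⟨m, hm⟩ : ∃ m, (n + 7) / 8 = m + 1 := ⟨(n + 7) / 8 - 1, by omega⟩
  rw [pvBRun, pvRange_stride, hm, List.range_succ_eq_map, List.map_cons, List.foldl_cons]
  have hset : (c :: t).set ((8 * ((0 : Nat) : Int)).toNat) '0' = '0' :: t := by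
    norm_num
  have hmapeq : (List.map Nat.succ (List.range m)).map (fun k : Nat => (8 * (k : Int)))
      = (List.range m).map (fun k : Nat => (8 * (k : Int) + 8)) := by
    rw [List.map_map]
    exact List.map_congr_left (fun k _ => by simp [Nat.succ_eq_add_one]; ring)
  rw [hset, hmapeq]
  by_cases h8 : n ≤ 8
  · have hm0 : m = 0 := by omega
    have hdrop : (c :: t).drop 8 = [] := List.drop_eq_nil_of_le (by simp; omega)
    have htake : t.take 7 = t := List.take_of_length_le (by omega)
    subst hm0
    simp [hdrop, htake, pvBRun_nil]
  · have hsplit : ('0' : Char) :: t = ('0' :: t.take 7) ++ t.drop 7 := by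
      rw [List.cons_append, ← List.take_append_drop 7 t]
      simp
    have hlen : (('0' : Char) :: t.take 7).length = 8 := by
      simp [List.length_take]; omega
    rw [hsplit, pvFoldl_set_shift _ _ _ hlen]
    have hd78 : t.drop 7 = (c :: t).drop 8 := by simp
    rw [hd78]
    congr 1
    rw [pvBRun, pvRange_stride]
    have hm' : ((c :: t).drop 8).length = n - 8 := by simp [List.length_drop]; omega
    rw [hm']
    have : (n - 8 + 7) / 8 = m := by omega
    rw [this]

-- A's loop equals B's stride loop
lemma pvALoop_eq_pvBRun (l : List Char) : pvALoop l = pvBRun l := by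
  by_cases h : l = []
  · subst h; rw [pvBRun_nil, pvALoop.eq_def]; simp
  · obtain ⟨c, t, rfl⟩ := List.exists_cons_of_ne_nil h
    rw [pvALoop.eq_def, dif_pos (by simp)]
    have h18 : PySem.List.slice (c :: t) (some 1) (some 8) = t.take 7 := by
      have := PySem.List.slice_natCast (xs := c :: t) (a := 1) (b := 8)
      simpa using this
    have h8 : PySem.List.slice (c :: t) (some 8) none = (c :: t).drop 8 := by
      have := PySem.List.slice_from (c :: t) (a := (8 : Int)) (by norm_num)
      simpa using this
    rw [h18, h8, pvALoop_eq_pvBRun ((c :: t).drop 8), pvBRun_chunk]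
termination_by l.length
decreasing_by
  have hl : l = c :: t := by assumption
  subst hl
  simp [List.length_drop]

-- ===== VERDICT (by name: the statement is the Claim_ definition above) =====
theorem from_ascii_to_binary_spec : Claim_equal_from_ascii_to_binary := by
  intro txt _
  show from_ascii_to_binary txt = from_ascii_to_binary_alt txt
  simp only [from_ascii_to_binary, from_ascii_to_binary_alt, pvALoop_eq_pvBRun, pvBRun]
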